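-- pv_equiv track=rewrite | github.com/ixtel/itools | src/rewr/mysql_read.py | _result_prepare_json
-- ===== SOURCE A (Python) =====
-- def _result_prepare_json(header, _header_result, enabled, table):
-- 	"""
-- 	:param header:
-- 	:param _header_result:
-- 	:param enabled:
-- 	:param table:
-- 	:return:
-- 	"""
-- 	result_table = []
-- 	for _row in table:
-- 		result_row = {}
-- 		for i, _col in enumerate(header):
-- 			if enabled[i]:
-- 				result_row[_col] = _row[i]
-- 		result_table.append(result_row)
-- 	return result_table
-- ===== SOURCE B (Python) =====
-- def _result_prepare_json(header, _header_result, enabled, table):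
--     """Column-major construction: gather each enabled column across all rows,
--     then fill one pre-allocated dict per row column by column."""
--     cols = [(name, [row[i] for row in table])
--             for i, (name, keep) in enumerate(zip(header, enabled)) if keep]
--     result = [{} for _ in table]
--     for name, values in cols:
--         for d, v in zip(result, values):
--             d[name] = v
--     return result
-- ===== Notes on version B (the rewrite author's own statement) =====
-- stated objective: alternative
-- what changed: B inverts the loop nesting: it builds each enabled column as a whole (name, list-of-values-across-rows) and then fills one pre-allocated dict per row column by column, instead of A's row-by-row scan that tests enabled[i] per cell.
import Mathlib
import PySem

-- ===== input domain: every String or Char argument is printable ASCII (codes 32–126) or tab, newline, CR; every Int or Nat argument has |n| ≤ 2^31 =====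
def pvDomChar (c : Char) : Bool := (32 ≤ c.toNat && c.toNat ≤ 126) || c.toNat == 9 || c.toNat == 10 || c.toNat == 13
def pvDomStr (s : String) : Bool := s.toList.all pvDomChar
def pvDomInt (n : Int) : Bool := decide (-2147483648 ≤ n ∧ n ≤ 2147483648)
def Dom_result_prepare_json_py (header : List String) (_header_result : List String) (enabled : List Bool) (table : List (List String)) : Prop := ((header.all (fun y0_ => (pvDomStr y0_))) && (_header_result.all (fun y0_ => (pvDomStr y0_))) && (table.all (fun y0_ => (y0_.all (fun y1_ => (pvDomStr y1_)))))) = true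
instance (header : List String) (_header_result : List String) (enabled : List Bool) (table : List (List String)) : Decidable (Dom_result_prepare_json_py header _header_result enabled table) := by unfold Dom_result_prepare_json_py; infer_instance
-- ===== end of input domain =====

-- B builds the table column-major (whole enabled columns first, then fills the rows) instead of A's row-major scan; return values agree on Pre_.

-- ===== PORT A =====
def result_prepare_json_py (header : List String) (_header_result : List String) (enabled : List Bool) (table : List (List String)) : List (List (String × String)) :=
  table.foldl (fun result_table _row =>
    result_table ++ [((PySem.List.enumerate header).foldl
      (fun result_row p =>
        if ((PySem.List.pyGet? enabled p.1).getD false) = true then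
          result_row.insert p.2 ((PySem.List.pyGet? _row p.1).getD "")
        else result_row)
      PySem.Dict.empty).items]) []

-- ===== PORT B =====
-- cols = [(name, [row[i] for row in table]) for i, (name, keep) in enumerate(zip(header, enabled)) if keep]
-- result = [{} for _ in table]; for name, values in cols: for d, v in zip(result, values): d[name] = v
def result_prepare_json_py_alt (header : List String) (_header_result : List String) (enabled : List Bool) (table : List (List String)) : List (List (String × String)) :=
  let cols := ((PySem.List.enumerate (header.zip enabled)).filter (fun p => p.2.2)).map
      (fun p => (p.2.1, table.map (fun row => (PySem.List.pyGet? row p.1).getD "")))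
  let result := table.map (fun _ => (PySem.Dict.empty : PySem.Dict String String))
  (cols.foldl (fun res nv => (res.zip nv.2).map (fun dv => dv.1.insert nv.1 dv.2)) result).map
    PySem.Dict.items

-- ===== PRECONDITION & SPEC =====
-- Pre_ is exactly the set of inputs on which the Python A returns (it raises IndexError on
-- all others): enabled must cover header, and each row must be long enough at the enabled
-- positions.  Vacuously true for an empty table, where A returns [].
def Pre_result_prepare_json_py (header : List String) (_header_result : List String) (enabled : List Bool) (table : List (List String)) : Prop :=
  ∀ row ∈ table, header.length ≤ enabled.length ∧
    ∀ i < header.length, enabled.getD i false = true → i < row.length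
instance (header : List String) (_header_result : List String) (enabled : List Bool) (table : List (List String)) : Decidable (Pre_result_prepare_json_py header _header_result enabled table) := by unfold Pre_result_prepare_json_py; infer_instance
def pvWitness_result_prepare_json_py : List String × List String × List Bool × List (List String) :=
  (["a", "b", "c"], [], [true, false, true], [["1", "2", "3"], ["x", "y", "z"]])


def Spec_result_prepare_json_py (header : List String) (_header_result : List String) (enabled : List Bool) (table : List (List String)) (out : List (List (String × String))) : Prop := out = result_prepare_json_py_alt header _header_result enabled table
instance (header : List String) (_header_result : List String) (enabled : List Bool) (table : List (List String)) (out : List (List (String × String))) : Decidable (Spec_result_prepare_json_py header _header_result enabled table out) := by unfold Spec_result_prepare_json_py; infer_instance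

-- ===== CLAIM (what is proved, stated in full; the proofs are below) =====
def Claim_equal_result_prepare_json_py : Prop := ∀ (header : List String) (_header_result : List String) (enabled : List Bool) (table : List (List String)), Dom_result_prepare_json_py header _header_result enabled table → Pre_result_prepare_json_py header _header_result enabled table → Spec_result_prepare_json_py header _header_result enabled table (result_prepare_json_py header _header_result enabled table)

-- ===== LEMMAS AND PROOFS =====

-- A's per-row guarded fold over enumerate(header), with the enabled test via pyGet?, equals
-- the fold over the kept pairs of enumerate(zip(header, enabled)) (B's column index list).
theorem pv_row_fold (row : List String) :
    ∀ (hd : List String) (en : List Bool) (k : Nat) (d : PySem.Dict String String),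
      (PySem.List.enumerate hd (k : Int)).foldl
        (fun r p => if ((PySem.List.pyGet? en p.1).getD false) = true then
            r.insert p.2 ((PySem.List.pyGet? row p.1).getD "") else r) d
      = ((PySem.List.enumerate (hd.zip (en.drop k)) (k : Int)).filter (fun p => p.2.2)).foldl
          (fun r p => r.insert p.2.1 ((PySem.List.pyGet? row p.1).getD "")) d := by
  intro hd
  induction hd with
  | nil => intro en k d; simp [PySem.List.enumerate_nil]
  | cons h hd ih =>
      intro en k d
      by_cases hk : k < en.length
      · rw [List.drop_eq_getElem_cons hk]
        have hc : ((PySem.List.pyGet? en (k : Int)).getD false) = en[k] := by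
          simp [PySem.List.pyGet?_natCast, List.getElem?_eq_getElem hk]
        have hcast : ((k : Int) + 1) = ((k + 1 : Nat) : Int) := by push_cast; ring
        rw [List.zip_cons_cons, PySem.List.enumerate_cons, PySem.List.enumerate_cons,
            List.foldl_cons, hc, hcast, ih en (k + 1)]
        by_cases he : en[k] = true <;> simp [he]
      · have hnone : PySem.List.pyGet? en (k : Int) = none := by
          rw [PySem.List.pyGet?_natCast]
          exact List.getElem?_eq_none (by omega)
        have hdrop : en.drop k = [] := List.drop_eq_nil_of_le (by omega)
        have hcast : ((k : Int) + 1) = ((k + 1 : Nat) : Int) := by push_cast; ring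
        rw [PySem.List.enumerate_cons, List.foldl_cons, hnone, hdrop, List.zip_nil_right,
            PySem.List.enumerate_nil]
        simp only [Option.getD_none, if_neg (by decide : ¬ (false = true))]
        rw [hcast, ih en (k + 1)]
        rw [List.drop_eq_nil_of_le (by omega), List.zip_nil_right, PySem.List.enumerate_nil]

-- Loop interchange: folding a list of columns over a row-indexed list of dicts equals
-- mapping each row to the fold of the columns over its own dict.
theorem pv_col_fold (t : List (List String)) :
    ∀ (cs : List (Int × String × Bool)) (h0 : List String → PySem.Dict String String),
      cs.foldl
        (fun res p => ((res.zip (t.map (fun row => (PySem.List.pyGet? row p.1).getD ""))).map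
          (fun dv => dv.1.insert p.2.1 dv.2)))
        (t.map h0)
      = t.map (fun row =>
          cs.foldl (fun d p => d.insert p.2.1 ((PySem.List.pyGet? row p.1).getD "")) (h0 row)) := by
  intro cs
  induction cs with
  | nil => intro h0; simp
  | cons c cs ih =>
      intro h0
      rw [List.foldl_cons, List.zip_map', List.map_map]
      simp only [Function.comp_def]
      rw [ih (fun row => (h0 row).insert c.2.1 ((PySem.List.pyGet? row c.1).getD ""))]
      simp [List.foldl_cons]

-- ===== VERDICT (by name: the statement is the Claim_ definition above) =====
theorem result_prepare_json_py_spec : Claim_equal_result_prepare_json_py := by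
  intro header _header_result enabled table _hdom _hpre
  unfold Spec_result_prepare_json_py result_prepare_json_py result_prepare_json_py_alt
  dsimp only
  rw [PySem.List.foldl_append_singleton_eq_map, List.foldl_map, pv_col_fold, List.map_map]
  apply List.map_congr_left
  intro row _
  have h0 := pv_row_fold row header enabled 0 PySem.Dict.empty
  simp only [Nat.cast_zero, List.drop_zero] at h0
  simp [Function.comp, h0]
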